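-- pv_equiv track=rewrite | github.com/kenandjak/Conversor_Bases_Numericas | conversor_bn.py | numero_em_lista
-- ===== SOURCE A (Python) =====
-- def numero_em_lista(numero):
--     numero = numero.upper()
--     lista = []
--     letras = [['A',10],['B',11],['C',12],['D',13],['E',14],['F',15],['G',16],['H',17],['I',18],['J',19],['K',20],['L',21],['M',22],
--               ['N',23],['O',24],['P',25],['Q',26],['R',27],['S',28],['T',29],['U',30],['V',31],['W',32],['X',33],['Y',34],['Z',35]]
--     for algarismo in numero:
--         iterador1 = 0
--         iterador2 = 0
--         while iterador1 < 10 or iterador2 < 26: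
--                 if str(iterador1) == algarismo:
--                     algarismo = int(algarismo)
--                     lista.append(algarismo)
--                     break
--                 elif letras[iterador2][0] == algarismo:
--                     algarismo = int(letras[iterador2][1])
--                     lista.append(algarismo)
--                     break
--                 else:
--                     iterador1 += 1
--                     iterador2 += 1
--     return lista
-- ===== SOURCE B (Python) =====
-- def numero_em_lista(numero):
--     lista = []
--     for algarismo in numero.upper():
--         if '0' <= algarismo <= '9':
--             lista.append(ord(algarismo) - 48)
--         elif 'A' <= algarismo <= 'Z':
--             lista.append(ord(algarismo) - 55)
--     return lista
-- ===== Notes on version B (the rewrite author's own statement) =====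
-- stated objective: faster
-- what changed: Replaced the 26-entry letter table and the per-character 36-step linear search (with str()/int() conversions) by a single pass that classifies each character by ASCII range and computes its digit value arithmetically from its character code.
import Mathlib
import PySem

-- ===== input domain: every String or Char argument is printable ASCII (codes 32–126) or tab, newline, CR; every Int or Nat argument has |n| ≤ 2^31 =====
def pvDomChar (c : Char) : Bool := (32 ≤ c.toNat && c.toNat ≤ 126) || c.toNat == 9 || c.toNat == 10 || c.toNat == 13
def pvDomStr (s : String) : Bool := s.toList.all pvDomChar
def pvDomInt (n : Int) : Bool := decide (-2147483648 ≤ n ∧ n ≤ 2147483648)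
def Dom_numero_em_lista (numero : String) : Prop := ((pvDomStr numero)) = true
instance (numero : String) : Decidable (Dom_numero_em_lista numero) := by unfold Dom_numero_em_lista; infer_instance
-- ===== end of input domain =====

-- B drops A's 26-entry letter table and the per-character 36-step linear search: one pass,
-- classifying each character by ASCII range and computing its value from its character code (simpler).

-- ===== PORT A =====
def pvLetras : List (String × Int) :=
  [("A",10),("B",11),("C",12),("D",13),("E",14),("F",15),("G",16),("H",17),("I",18),("J",19),
   ("K",20),("L",21),("M",22),("N",23),("O",24),("P",25),("Q",26),("R",27),("S",28),("T",29),
   ("U",30),("V",31),("W",32),("X",33),("Y",34),("Z",35)]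

-- A's inner `while` loop, fuel-bounded (the fuel only makes the loop total: starting from
-- (0,0) the loop always exits or breaks within 27 iterations, so fuel 36 is never exhausted).
def pvALoop (c : Char) : Nat → Nat → Nat → Option Int
  | 0, _, _ => none
  | fuel+1, iterador1, iterador2 =>
    if iterador1 < 10 ∨ iterador2 < 26 then
      if PySem.Int.toStr (iterador1 : Int) = String.ofList [c] then
        -- algarismo = int(algarismo): the match guarantees the parse succeeds, so getD is exact
        some ((PySem.Int.ofStr? (String.ofList [c])).getD 0)
      else
        match PySem.List.pyGet? pvLetras (iterador2 : Int) with
        | some p =>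
          if p.1 = String.ofList [c] then some p.2
          else pvALoop c fuel (iterador1+1) (iterador2+1)
        | none => none   -- unreachable from (0,0): Python's IndexError never fires there
    else none            -- loop exits without a break: char is skipped

def numero_em_lista (numero : String) : List Int :=
  (PySem.Str.upper numero).toList.foldl
    (fun lista algarismo =>
      match pvALoop algarismo 36 0 0 with
      | some v => lista ++ [v]
      | none => lista) []

-- ===== PORT B =====
def pvDigit (algarismo : Char) : Option Int :=
  if '0' ≤ algarismo ∧ algarismo ≤ '9' then some ((algarismo.toNat : Int) - 48)
  else if 'A' ≤ algarismo ∧ algarismo ≤ 'Z' then some ((algarismo.toNat : Int) - 55)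
  else none

def numero_em_lista_alt (numero : String) : List Int :=
  (PySem.Str.upper numero).toList.filterMap pvDigit

-- ===== PRECONDITION & SPEC =====
def Spec_numero_em_lista (numero : String) (out : List Int) : Prop := out = numero_em_lista_alt numero
instance (numero : String) (out : List Int) : Decidable (Spec_numero_em_lista numero out) := by unfold Spec_numero_em_lista; infer_instance

-- ===== CLAIM (what is proved, stated in full; the proofs are below) =====
def Claim_equal_numero_em_lista : Prop := ∀ (numero : String), Dom_numero_em_lista numero → Spec_numero_em_lista numero (numero_em_lista numero)

-- ===== LEMMAS AND PROOFS =====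

-- For every ASCII character, A's inner search returns exactly B's arithmetic classification.
set_option maxRecDepth 10000 in
theorem pvALoop_eq_pvDigit : ∀ n < 128, pvALoop (Char.ofNat n) 36 0 0 = pvDigit (Char.ofNat n) := by
  decide

theorem pvUpperChar_lt (c : Char) (h : c.toNat < 128) :
    (PySem.Chars.upperChar c).toNat < 128 := by
  unfold PySem.Chars.upperChar
  split
  · have hv : Nat.isValidChar (c.toNat - 32) := Or.inl (by omega)
    rw [Char.toNat_ofNat, if_pos hv]
    omega
  · exact h

theorem pvFoldl_eq_filterMap (l : List Char) (acc : List Int)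
    (h : ∀ c ∈ l, pvALoop c 36 0 0 = pvDigit c) :
    l.foldl (fun lista algarismo =>
      match pvALoop algarismo 36 0 0 with
      | some v => lista ++ [v]
      | none => lista) acc = acc ++ l.filterMap pvDigit := by
  induction l generalizing acc with
  | nil => simp
  | cons c t ih =>
    have hc := h c (List.mem_cons_self)
    have ht : ∀ c' ∈ t, pvALoop c' 36 0 0 = pvDigit c' := fun c' hm => h c' (List.mem_cons_of_mem _ hm)
    simp only [List.foldl_cons, List.filterMap_cons, hc]
    cases hd : pvDigit c with
    | none => simp [ih _ ht]
    | some v => simp [ih _ ht]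

-- ===== VERDICT (by name: the statement is the Claim_ definition above) =====
theorem numero_em_lista_spec : Claim_equal_numero_em_lista := by
  intro numero hdom
  unfold Spec_numero_em_lista numero_em_lista numero_em_lista_alt
  apply pvFoldl_eq_filterMap ((PySem.Str.upper numero).toList) []
  intro c hc
  rw [PySem.Str.toList_upper] at hc
  unfold PySem.Chars.upper at hc
  obtain ⟨c', hc', rfl⟩ := List.mem_map.mp hc
  have hdomc : pvDomChar c' = true := by
    unfold Dom_numero_em_lista pvDomStr at hdom
    exact List.all_eq_true.mp hdom c' hc'
  have h128 : c'.toNat < 128 := by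
    unfold pvDomChar at hdomc
    simp only [Bool.or_eq_true, Bool.and_eq_true, decide_eq_true_eq, beq_iff_eq] at hdomc
    omega
  have hu := pvUpperChar_lt c' h128
  have := pvALoop_eq_pvDigit (PySem.Chars.upperChar c').toNat hu
  rwa [Char.ofNat_toNat] at this
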